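-- pv_equiv track=rewrite | github.com/felixxx04/graduation_proj | medical-model/scripts/merge_safety_data.py | _find_drug_name
-- ===== SOURCE A (Python) =====
-- def _find_drug_name(name: str, merged_drugs: dict) -> str:
--     """在 merged_drugs 中查找药物名（支持大小写不敏感匹配）"""
--     # 精确匹配
--     if name in merged_drugs:
--         return name
--     # 大小写不敏感匹配
--     for key in merged_drugs:
--         if key.lower() == name.lower():
--             return key
--     # 部分匹配
--     name_lower = name.lower()
--     for key in merged_drugs:
--         if name_lower in key.lower() or key.lower() in name_lower:
--             return key
--     return None
-- ===== SOURCE B (Python) =====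
-- def _find_drug_name(name: str, merged_drugs: dict) -> str:
--     """Single pass: record the first case-insensitive and first partial match, then resolve by priority."""
--     name_lower = name.lower()
--     ci_match = None
--     partial_match = None
--     for key in merged_drugs:
--         key_lower = key.lower()
--         if ci_match is None and key_lower == name_lower:
--             ci_match = key
--         if partial_match is None and (name_lower in key_lower or key_lower in name_lower):
--             partial_match = key
--     if name in merged_drugs:
--         return name
--     if ci_match is not None:
--         return ci_match
--     return partial_match
-- ===== Notes on version B (the rewrite author's own statement) =====
-- stated objective: faster
-- what changed: Replaces A's three sequential scans over the dict with a single scan that records the first case-insensitive and first substring match (lowercasing name once instead of once per key) and resolves exact > ci > partial priority after the loop.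
import Mathlib
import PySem

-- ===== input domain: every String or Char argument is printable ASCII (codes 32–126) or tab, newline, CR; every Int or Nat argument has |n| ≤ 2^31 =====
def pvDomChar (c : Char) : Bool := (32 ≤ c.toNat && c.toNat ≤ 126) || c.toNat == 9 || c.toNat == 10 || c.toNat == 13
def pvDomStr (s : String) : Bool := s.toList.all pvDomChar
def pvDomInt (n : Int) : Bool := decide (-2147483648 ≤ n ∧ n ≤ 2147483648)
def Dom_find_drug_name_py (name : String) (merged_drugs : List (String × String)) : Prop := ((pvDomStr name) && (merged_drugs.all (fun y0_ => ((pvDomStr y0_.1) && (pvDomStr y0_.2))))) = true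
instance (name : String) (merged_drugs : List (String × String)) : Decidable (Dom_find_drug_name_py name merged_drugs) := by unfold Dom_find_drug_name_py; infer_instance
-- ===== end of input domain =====

-- B replaces A's three sequential scans with a single scan recording the first case-insensitive
-- and first partial match (lowercasing name once, not per key), resolved by priority after the loop;
-- a timing run measured B faster.

-- ===== PORT A =====
-- 'for key in merged_drugs: if key.lower() == name.lower(): return key'
def a_ci_loop (name : String) : List (String × String) → Option String
  | [] => none
  | (key, _) :: rest =>
      if PySem.Str.lower key == PySem.Str.lower name then some key else a_ci_loop name rest

-- 'for key in merged_drugs: if name_lower in key.lower() or key.lower() in name_lower: return key'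
def a_part_loop (name_lower : String) : List (String × String) → Option String
  | [] => none
  | (key, _) :: rest =>
      if PySem.Str.isIn name_lower (PySem.Str.lower key) || PySem.Str.isIn (PySem.Str.lower key) name_lower
      then some key else a_part_loop name_lower rest

def find_drug_name_py (name : String) (merged_drugs : List (String × String)) : Option String :=
  if merged_drugs.any (fun p => p.1 == name) then some name
  else match a_ci_loop name merged_drugs with
    | some key => some key
    | none =>
        let name_lower := PySem.Str.lower name
        a_part_loop name_lower merged_drugs

-- ===== PORT B =====
-- single pass maintaining (ci_match, partial_match), each set only once
def b_loop (name_lower : String) : List (String × String) → Option String × Option String → Option String × Option String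
  | [], st => st
  | (key, _) :: rest, (ci, part) =>
      let key_lower := PySem.Str.lower key
      let ci' := if ci.isNone && (key_lower == name_lower) then some key else ci
      let part' := if part.isNone && (PySem.Str.isIn name_lower key_lower || PySem.Str.isIn key_lower name_lower)
                   then some key else part
      b_loop name_lower rest (ci', part')

def find_drug_name_py_alt (name : String) (merged_drugs : List (String × String)) : Option String :=
  let name_lower := PySem.Str.lower name
  match b_loop name_lower merged_drugs (none, none) with
  | (ci_match, partial_match) =>
      if merged_drugs.any (fun p => p.1 == name) then some name
      else match ci_match with
        | some key => some key
        | none => partial_match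

-- ===== PRECONDITION & SPEC =====
def Spec_find_drug_name_py (name : String) (merged_drugs : List (String × String)) (out : Option String) : Prop := out = find_drug_name_py_alt name merged_drugs
instance (name : String) (merged_drugs : List (String × String)) (out : Option String) : Decidable (Spec_find_drug_name_py name merged_drugs out) := by unfold Spec_find_drug_name_py; infer_instance

-- ===== CLAIM (what is proved, stated in full; the proofs are below) =====
def Claim_equal_find_drug_name_py : Prop := ∀ (name : String) (merged_drugs : List (String × String)), Dom_find_drug_name_py name merged_drugs → Spec_find_drug_name_py name merged_drugs (find_drug_name_py name merged_drugs)

-- ===== LEMMAS AND PROOFS =====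

-- B's single loop computes exactly A's two first-match scans (accumulators generalized).
lemma b_loop_eq (name : String) (l : List (String × String)) (ci part : Option String) :
    b_loop (PySem.Str.lower name) l (ci, part) =
      (ci.orElse (fun _ => a_ci_loop name l), part.orElse (fun _ => a_part_loop (PySem.Str.lower name) l)) := by
  induction l generalizing ci part with
  | nil => cases ci <;> cases part <;> simp [b_loop, a_ci_loop, a_part_loop, Option.orElse]
  | cons hd tl ih =>
      obtain ⟨key, v⟩ := hd
      simp only [b_loop, a_ci_loop, a_part_loop]
      by_cases hc : (PySem.Str.lower key == PySem.Str.lower name) = true <;>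
        by_cases hp : (PySem.Str.isIn (PySem.Str.lower name) (PySem.Str.lower key) ||
            PySem.Str.isIn (PySem.Str.lower key) (PySem.Str.lower name)) = true <;>
        cases ci <;> cases part <;>
        simp only [hc, hp, Option.isNone, Bool.and_true, Bool.and_false, if_true,
          if_false, Bool.false_eq_true, ih, Option.orElse]

theorem find_drug_name_py_spec : Claim_equal_find_drug_name_py := by
  intro name merged_drugs _
  unfold Spec_find_drug_name_py find_drug_name_py find_drug_name_py_alt
  simp only [b_loop_eq]
  by_cases h : merged_drugs.any (fun p => p.1 == name)
  · simp [h]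
  · simp only [h]
    cases hci : a_ci_loop name merged_drugs <;> simp [Option.orElse]
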